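-- pv_equiv track=rewrite | github.com/rightthumb/rightthumb-widgets-v0 | widgets/python/_rightThumb/_hub/_string.py | removeNonNumber
-- ===== SOURCE A (Python) =====
-- def removeNonNumber( string ):
-- 	PERMITTED_CHARS = '0123456789'
-- 	string = str(string)
--
-- 	result = ''
--
-- 	for cha in string:
-- 		if cha in PERMITTED_CHARS:
-- 			result += cha
-- 	return result
-- ===== SOURCE B (Python) =====
-- import re
--
-- def removeNonNumber(string):
--     string = str(string)
--     return re.sub(r'[^0-9]', '', string)
-- ===== Notes on version B (the rewrite author's own statement) =====
-- stated objective: idiomatic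
-- what changed: Replaces the character loop with string concatenation by a single re.sub pass deleting every non-digit with the class [^0-9].
import Mathlib
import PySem

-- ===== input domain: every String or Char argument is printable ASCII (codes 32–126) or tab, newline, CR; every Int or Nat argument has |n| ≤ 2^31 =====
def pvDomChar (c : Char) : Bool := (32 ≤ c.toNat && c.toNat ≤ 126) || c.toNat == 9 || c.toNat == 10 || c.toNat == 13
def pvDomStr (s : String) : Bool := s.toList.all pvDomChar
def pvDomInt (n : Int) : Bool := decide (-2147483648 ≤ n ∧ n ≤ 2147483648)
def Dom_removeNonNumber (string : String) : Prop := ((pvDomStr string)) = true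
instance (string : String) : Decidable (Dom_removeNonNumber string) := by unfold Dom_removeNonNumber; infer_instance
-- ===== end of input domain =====

-- B deletes non-digits with one re.sub(r'[^0-9]','',s) pass instead of A's loop with string concatenation (idiomatic).

-- ===== PORT A =====
-- loop: result = ''; for cha in string: if cha in PERMITTED_CHARS: result += cha
def removeNonNumber (string : String) : String :=
  String.mk (string.toList.foldl
    (fun result cha =>
      if ("0123456789".toList.contains cha) then result ++ [cha] else result)
    [])

-- ===== PORT B =====
-- re.sub(r'[^0-9]', '', s): keep exactly the characters in the class 0-9 (ported as a filter, the regex's contract)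
def removeNonNumber_alt (string : String) : String :=
  String.mk (string.toList.filter (fun c => "0123456789".toList.contains c))

-- ===== PRECONDITION & SPEC =====
def Spec_removeNonNumber (string : String) (out : String) : Prop := out = removeNonNumber_alt string
instance (string : String) (out : String) : Decidable (Spec_removeNonNumber string out) := by unfold Spec_removeNonNumber; infer_instance

-- ===== CLAIM (what is proved, stated in full; the proofs are below) =====
def Claim_equal_removeNonNumber : Prop := ∀ (string : String), Dom_removeNonNumber string → Spec_removeNonNumber string (removeNonNumber string)

-- ===== LEMMAS AND PROOFS =====
theorem foldl_keep_eq_filter (p : Char → Bool) (l acc : List Char) :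
    l.foldl (fun result cha => if p cha then result ++ [cha] else result) acc
      = acc ++ l.filter p := by
  induction l generalizing acc with
  | nil => simp
  | cons c t ih =>
    by_cases h : p c = true <;> simp [List.foldl, List.filter, h, ih]

-- ===== VERDICT (by name: the statement is the Claim_ definition above) =====
theorem removeNonNumber_spec : Claim_equal_removeNonNumber := by
  intro s _
  unfold Spec_removeNonNumber removeNonNumber removeNonNumber_alt
  rw [foldl_keep_eq_filter]
  rfl
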